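-- pv_equiv track=rewrite | github.com/IES-Rafael-Alberti/dawb1-2425-ejercicios-u2-falbmun0906 | src/ej22_25.py | contar_letras_en_palabra
-- ===== SOURCE A (Python) =====
-- def contar_letras_en_palabra(frase: str):
--     frase = ((frase.replace(",", "")).replace(".", "")).split(" ")
--     palabra_larga = ""
--
--     for palabra in frase:
--         if not palabra.isdigit():
--             if len(palabra) > len(palabra_larga):
--                 palabra_larga = palabra
--
--     return palabra_larga
-- ===== SOURCE B (Python) =====
-- def contar_letras_en_palabra(frase: str):
--     palabras = frase.replace(",", "").replace(".", "").split(" ")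
--     candidatas = [p for p in palabras if not p.isdigit()]
--     if not candidatas:
--         return ""
--     return sorted(candidatas, key=len, reverse=True)[0]
-- ===== Notes on version B (the rewrite author's own statement) =====
-- stated objective: alternative
-- what changed: Replaces A's running-max loop with a filter of the non-digit words followed by a stable length-descending sort, returning the head (or "" if no word survives the filter).
import Mathlib
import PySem

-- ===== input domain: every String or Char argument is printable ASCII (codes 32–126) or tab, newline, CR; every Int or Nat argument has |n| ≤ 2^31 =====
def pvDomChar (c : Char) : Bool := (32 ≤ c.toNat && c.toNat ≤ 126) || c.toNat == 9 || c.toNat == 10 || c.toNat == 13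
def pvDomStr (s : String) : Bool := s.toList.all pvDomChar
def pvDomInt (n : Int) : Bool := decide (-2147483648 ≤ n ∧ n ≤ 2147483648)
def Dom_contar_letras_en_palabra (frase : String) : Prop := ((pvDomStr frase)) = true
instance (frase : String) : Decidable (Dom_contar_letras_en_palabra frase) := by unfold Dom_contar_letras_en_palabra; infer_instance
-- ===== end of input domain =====

-- B replaces A's running-max loop by filter-then-stable-descending-sort-and-take-head (alternative decomposition, not faster).

-- ===== PORT A =====
def contar_letras_en_palabra (frase : String) : String :=
  let palabras :=
    (PySem.Str.split? (PySem.Str.replace (PySem.Str.replace frase "," "") "." "") " ").getD []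
    -- split? is some since the separator " " is nonempty; getD never takes its default
  palabras.foldl
    (fun palabra_larga palabra =>
      if ¬ PySem.Str.strIsdigit palabra then
        if PySem.Str.len palabra > PySem.Str.len palabra_larga then palabra else palabra_larga
      else palabra_larga)
    ""

-- ===== PORT B =====
def contar_letras_en_palabra_alt (frase : String) : String :=
  let palabras :=
    (PySem.Str.split? (PySem.Str.replace (PySem.Str.replace frase "," "") "." "") " ").getD []
  let candidatas := palabras.filter (fun p => !PySem.Str.strIsdigit p)
  match PySem.List.sorted candidatas PySem.Str.len true with
  | [] => ""
  | h :: _ => h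

-- ===== PRECONDITION & SPEC =====
def Spec_contar_letras_en_palabra (frase : String) (out : String) : Prop := out = contar_letras_en_palabra_alt frase
instance (frase : String) (out : String) : Decidable (Spec_contar_letras_en_palabra frase out) := by unfold Spec_contar_letras_en_palabra; infer_instance

-- ===== CLAIM (what is proved, stated in full; the proofs are below) =====
def Claim_equal_contar_letras_en_palabra : Prop := ∀ (frase : String), Dom_contar_letras_en_palabra frase → Spec_contar_letras_en_palabra frase (contar_letras_en_palabra frase)

-- ===== LEMMAS AND PROOFS =====

-- head of insertBy on a nonempty list
theorem pv_insertBy_cons {α : Type} (before : α → α → Bool) (x h : α) (t : List α) :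
    PySem.List.insertBy before x (h :: t) =
      if before x h then x :: h :: t else h :: PySem.List.insertBy before x t := by
  simp [PySem.List.insertBy]

-- the head of the insertion-sort accumulator evolves exactly like a running-max fold
theorem pv_head_foldl_insertBy {α : Type} (before : α → α → Bool) :
    ∀ (ws : List α) (h : α) (t : List α),
      (ws.foldl (fun acc x => PySem.List.insertBy before x acc) (h :: t)).head? =
        some (ws.foldl (fun m x => if before x m then x else m) h) := by
  intro ws
  induction ws with
  | nil => intro h t; simp
  | cons w rest ih =>
      intro h t
      simp only [List.foldl_cons, pv_insertBy_cons]
      by_cases hb : before w h = true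
      · simp [hb, ih w (h :: t)]
      · simp [hb, ih h (PySem.List.insertBy before w t)]

theorem pv_len_zero (w : String) (h : PySem.Str.len w ≤ 0) : w = "" := by
  have h0 : w.toList.length = 0 := by
    have : PySem.Str.len w = (w.toList.length : Int) := by
      simp [PySem.Str.len]
    omega
  have hnil : w.toList = [] := List.eq_nil_of_length_eq_zero h0
  exact String.toList_inj.mp (by simp [hnil])

-- the running-max fold over a list equals the head of its stable reverse sort by length
theorem pv_fold_eq_sorted_head (ws : List String) :
    ws.foldl
        (fun palabra_larga palabra =>
          if PySem.Str.len palabra > PySem.Str.len palabra_larga then palabra else palabra_larga)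
        "" =
      (match PySem.List.sorted ws PySem.Str.len true with
        | [] => ""
        | h :: _ => h) := by
  cases ws with
  | nil => simp [PySem.List.sorted]
  | cons w rest =>
      have hsorted :
          PySem.List.sorted (w :: rest) PySem.Str.len true =
            rest.foldl
              (fun acc x =>
                PySem.List.insertBy (fun a b => decide (PySem.Str.len b < PySem.Str.len a)) x acc)
              [w] := by
        simp [PySem.List.sorted, PySem.List.insertBy]
      have hhead :=
        pv_head_foldl_insertBy (fun a b => decide (PySem.Str.len b < PySem.Str.len a)) rest w []
      -- the left fold's first step: starting accumulator "" is absorbed by the first word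
      have hfirst :
          (if PySem.Str.len w > PySem.Str.len ("" : String) then w else ("" : String)) = w := by
        by_cases hw : PySem.Str.len w > PySem.Str.len ("" : String)
        · rw [if_pos hw]
        · have : PySem.Str.len ("" : String) = 0 := by decide
          have hz : PySem.Str.len w ≤ 0 := by omega
          simp [pv_len_zero w hz]
      have hsteps :
          rest.foldl
              (fun palabra_larga palabra =>
                if PySem.Str.len palabra > PySem.Str.len palabra_larga then palabra
                else palabra_larga)
              w =
            rest.foldl
              (fun m x =>
                if (fun a b => decide (PySem.Str.len b < PySem.Str.len a)) x m then x else m)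
              w := by
        congr 1
        funext a b
        by_cases hc : PySem.Str.len a < PySem.Str.len b <;> simp [gt_iff_lt]
      rw [List.foldl_cons, hfirst, hsteps, hsorted]
      cases hcase :
          rest.foldl
            (fun acc x =>
              PySem.List.insertBy (fun a b => decide (PySem.Str.len b < PySem.Str.len a)) x acc)
            [w] with
      | nil => rw [hcase] at hhead; simp at hhead
      | cons h t =>
          rw [hcase] at hhead
          simp only [List.head?_cons, Option.some.injEq] at hhead
          simp [hhead]

-- A's digit-guarded fold is the plain fold over the filtered list
theorem pv_fold_guard (ws : List String) :
    ws.foldl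
        (fun palabra_larga palabra =>
          if ¬ PySem.Str.strIsdigit palabra then
            if PySem.Str.len palabra > PySem.Str.len palabra_larga then palabra else palabra_larga
          else palabra_larga)
        "" =
      (ws.filter (fun p => !PySem.Str.strIsdigit p)).foldl
        (fun palabra_larga palabra =>
          if PySem.Str.len palabra > PySem.Str.len palabra_larga then palabra else palabra_larga)
        "" := by
  rw [List.foldl_filter]
  congr 1
  funext acc p
  by_cases hd : PySem.Str.strIsdigit p <;> simp_all

-- ===== VERDICT (by name: the statement is the Claim_ definition above) =====
theorem contar_letras_en_palabra_spec : Claim_equal_contar_letras_en_palabra := by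
  intro frase _
  simp only [Spec_contar_letras_en_palabra, contar_letras_en_palabra,
    contar_letras_en_palabra_alt]
  generalize (PySem.Str.split? (PySem.Str.replace (PySem.Str.replace frase "," "") "." "") " ").getD [] = ws
  rw [pv_fold_guard ws, pv_fold_eq_sorted_head]
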